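-- pv_equiv track=rewrite | github.com/Arescoreadmin/fg-core | scripts/verify_bp_c_003.py | check_orphans_and_missing
-- ===== SOURCE A (Python) =====
-- def check_orphans_and_missing(
--     defined_names: set[str],
--     referenced_names: set[str],
-- ) -> tuple[list[str], list[str]]:
--     """Check for unused schemas and missing referenced schemas.
--
--     Returns (unused_errors, missing_errors).
--     """
--     unused_errors: list[str] = []
--     missing_errors: list[str] = []
--
--     unused = defined_names - referenced_names
--     for name in sorted(unused):
--         unused_errors.append(f"Schema '{name}' defined but never referenced (orphaned)")
--
--     missing = referenced_names - defined_names
--     for name in sorted(missing):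
--         missing_errors.append(
--             f"Schema '{name}' referenced via $ref but not defined in components.schemas"
--         )
--
--     return unused_errors, missing_errors
-- ===== SOURCE B (Python) =====
-- def check_orphans_and_missing(
--     defined_names: set[str],
--     referenced_names: set[str],
-- ) -> tuple[list[str], list[str]]:
--     """Check for unused schemas and missing referenced schemas.
--
--     Returns (unused_errors, missing_errors).
--     """
--     unused_errors: list[str] = []
--     missing_errors: list[str] = []
--     for name in sorted(defined_names | referenced_names):
--         if name in defined_names and name not in referenced_names:
--             unused_errors.append(
--                 f"Schema '{name}' defined but never referenced (orphaned)"
--             )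
--         elif name in referenced_names and name not in defined_names:
--             missing_errors.append(
--                 f"Schema '{name}' referenced via $ref but not defined in components.schemas"
--             )
--     return unused_errors, missing_errors
-- ===== Notes on version B (the rewrite author's own statement) =====
-- stated objective: alternative
-- what changed: Replaces the two set-difference-then-sort passes by a single loop over the sorted union that classifies each name by membership into the orphaned or missing list.
import Mathlib
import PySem

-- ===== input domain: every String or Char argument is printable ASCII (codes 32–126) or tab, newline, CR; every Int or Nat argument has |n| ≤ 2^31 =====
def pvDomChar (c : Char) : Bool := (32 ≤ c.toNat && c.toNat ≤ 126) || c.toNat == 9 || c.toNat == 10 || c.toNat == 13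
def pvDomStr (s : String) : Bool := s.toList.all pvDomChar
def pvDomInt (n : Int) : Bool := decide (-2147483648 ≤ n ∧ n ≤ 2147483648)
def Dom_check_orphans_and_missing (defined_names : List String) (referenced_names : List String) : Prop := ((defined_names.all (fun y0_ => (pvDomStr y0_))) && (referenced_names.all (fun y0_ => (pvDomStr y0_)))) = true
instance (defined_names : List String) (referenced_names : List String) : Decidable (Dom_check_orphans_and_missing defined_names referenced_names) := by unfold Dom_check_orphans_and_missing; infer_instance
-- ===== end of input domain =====

-- B replaces A's two set-difference-then-sort passes by one classifying loop over the sorted union (objective: alternative decomposition, same cost).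

-- ===== PORT A =====
def fmtOrphan (name : String) : String :=
  "Schema '" ++ name ++ "' defined but never referenced (orphaned)"
def fmtMissing (name : String) : String :=
  "Schema '" ++ name ++ "' referenced via $ref but not defined in components.schemas"

def check_orphans_and_missing (defined_names : List String) (referenced_names : List String) : List String × List String :=
  let unused := PySem.Set.diff defined_names referenced_names
  let unused_errors := (PySem.List.sorted unused (fun x => x) false).foldl
    (fun acc name => acc ++ [fmtOrphan name]) []
  let missing := PySem.Set.diff referenced_names defined_names
  let missing_errors := (PySem.List.sorted missing (fun x => x) false).foldl
    (fun acc name => acc ++ [fmtMissing name]) []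
  (unused_errors, missing_errors)

-- ===== PORT B =====
def check_orphans_and_missing_alt (defined_names : List String) (referenced_names : List String) : List String × List String :=
  (PySem.List.sorted (PySem.Set.union (PySem.Set.ofList defined_names) referenced_names) (fun x => x) false).foldl
    (fun (acc : List String × List String) name =>
      if defined_names.contains name && !referenced_names.contains name then
        (acc.1 ++ [fmtOrphan name], acc.2)
      else if referenced_names.contains name && !defined_names.contains name then
        (acc.1, acc.2 ++ [fmtMissing name])
      else acc)
    ([], [])

-- ===== PRECONDITION & SPEC =====
-- Pre_: the Python parameters are sets, so under the type convention each list holds distinct elements.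
def Pre_check_orphans_and_missing (defined_names : List String) (referenced_names : List String) : Prop :=
  defined_names.Nodup ∧ referenced_names.Nodup
instance (defined_names : List String) (referenced_names : List String) : Decidable (Pre_check_orphans_and_missing defined_names referenced_names) := by unfold Pre_check_orphans_and_missing; infer_instance

def pvWitness_check_orphans_and_missing : List String × List String := (["a", "b"], ["b", "c"])

def Spec_check_orphans_and_missing (defined_names : List String) (referenced_names : List String) (out : List String × List String) : Prop := out = check_orphans_and_missing_alt defined_names referenced_names
instance (defined_names : List String) (referenced_names : List String) (out : List String × List String) : Decidable (Spec_check_orphans_and_missing defined_names referenced_names out) := by unfold Spec_check_orphans_and_missing; infer_instance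

-- ===== CLAIM (what is proved, stated in full; the proofs are below) =====
def Claim_equal_check_orphans_and_missing : Prop := ∀ (defined_names : List String) (referenced_names : List String), Dom_check_orphans_and_missing defined_names referenced_names → Pre_check_orphans_and_missing defined_names referenced_names → Spec_check_orphans_and_missing defined_names referenced_names (check_orphans_and_missing defined_names referenced_names)

-- ===== LEMMAS AND PROOFS =====

-- A's append-only loop is a map.
theorem foldl_append_map {α β : Type} (f : α → β) (l : List α) (a : List β) :
    l.foldl (fun acc x => acc ++ [f x]) a = a ++ l.map f := by
  induction l generalizing a with
  | nil => simp
  | cons x xs ih => simp [List.foldl, ih]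

-- B's classifying loop splits into the two filtered maps.
theorem foldl_classify (d r : List String) (l : List String) (a b : List String) :
    l.foldl
      (fun (acc : List String × List String) name =>
        if d.contains name && !r.contains name then
          (acc.1 ++ [fmtOrphan name], acc.2)
        else if r.contains name && !d.contains name then
          (acc.1, acc.2 ++ [fmtMissing name])
        else acc)
      (a, b)
    = (a ++ ((l.filter (fun n => d.contains n && !r.contains n)).map fmtOrphan),
       b ++ ((l.filter (fun n => r.contains n && !d.contains n)).map fmtMissing)) := by
  induction l generalizing a b with
  | nil => simp
  | cons x xs ih =>
    by_cases h1 : (d.contains x && !r.contains x) = true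
    · have h2 : (r.contains x && !d.contains x) = false := by
        cases hd : d.contains x <;> cases hr : r.contains x <;> simp_all
      rw [List.foldl_cons, if_pos h1, ih]
      simp only [List.filter_cons, h1, h2, if_true, Bool.false_eq_true, if_false, List.map_cons,
        List.append_assoc, List.cons_append, List.nil_append]
    · by_cases h2 : (r.contains x && !d.contains x) = true
      · rw [List.foldl_cons, if_neg h1, if_pos h2, ih]
        have h1' : (d.contains x && !r.contains x) = false := by
          cases hd : d.contains x <;> cases hr : r.contains x <;> simp_all
        simp only [List.filter_cons, h1', h2, if_true, Bool.false_eq_true, if_false, List.map_cons,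
          List.append_assoc, List.cons_append, List.nil_append]
      · rw [List.foldl_cons, if_neg h1, if_neg h2, ih]
        have h1' : (d.contains x && !r.contains x) = false := by simp_all
        have h2' : (r.contains x && !d.contains x) = false := by simp_all
        simp only [List.filter_cons, h1', h2', Bool.false_eq_true, if_false]

-- the sorted set difference is the matching filter of the sorted union
theorem sorted_diff_eq_filter_sorted_union (d r : List String)
    (hd : d.Nodup) :
    PySem.List.sorted (PySem.Set.diff d r) (fun x => x) false
      = (PySem.List.sorted (PySem.Set.union (PySem.Set.ofList d) r) (fun x => x) false).filter
          (fun n => d.contains n && !r.contains n) := by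
  apply PySem.List.sorted_eq_of_perm_of_pairwise_lt
  · -- permutation: both nodup with the same members
    have hU : (PySem.List.sorted (PySem.Set.union (PySem.Set.ofList d) r) (fun x => x) false).Nodup :=
      (PySem.List.sorted_perm _ _ _).symm.nodup (PySem.Set.nodup_union (PySem.Set.ofList d) r (PySem.Set.nodup_ofList d))
    rw [List.perm_ext_iff_of_nodup (hU.filter _) (PySem.Set.nodup_diff d r hd)]
    intro x
    simp [List.mem_filter, PySem.List.mem_sorted, PySem.Set.mem_union, PySem.Set.mem_ofList,
      PySem.Set.mem_diff]
    tauto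
  · -- strictly increasing: a filter of the strictly increasing sorted union
    apply List.Pairwise.filter
    have hle := PySem.List.sorted_pairwise (xs := PySem.Set.union (PySem.Set.ofList d) r)
      (key := fun x => x)
    have hne : (PySem.List.sorted (PySem.Set.union (PySem.Set.ofList d) r) (fun x => x) false).Nodup :=
      (PySem.List.sorted_perm _ _ _).symm.nodup (PySem.Set.nodup_union (PySem.Set.ofList d) r (PySem.Set.nodup_ofList d))
    exact (hle.and hne).imp (fun h => lt_of_le_of_ne h.1 h.2)

-- the other side, same statement with the roles of d and r swapped in the test
theorem sorted_diff_eq_filter_sorted_union' (d r : List String)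
    (hr : r.Nodup) :
    PySem.List.sorted (PySem.Set.diff r d) (fun x => x) false
      = (PySem.List.sorted (PySem.Set.union (PySem.Set.ofList d) r) (fun x => x) false).filter
          (fun n => r.contains n && !d.contains n) := by
  apply PySem.List.sorted_eq_of_perm_of_pairwise_lt
  · have hU : (PySem.List.sorted (PySem.Set.union (PySem.Set.ofList d) r) (fun x => x) false).Nodup :=
      (PySem.List.sorted_perm _ _ _).symm.nodup (PySem.Set.nodup_union (PySem.Set.ofList d) r (PySem.Set.nodup_ofList d))
    rw [List.perm_ext_iff_of_nodup (hU.filter _) (PySem.Set.nodup_diff r d hr)]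
    intro x
    simp [List.mem_filter, PySem.List.mem_sorted, PySem.Set.mem_union, PySem.Set.mem_ofList,
      PySem.Set.mem_diff]
    tauto
  · apply List.Pairwise.filter
    have hle := PySem.List.sorted_pairwise (xs := PySem.Set.union (PySem.Set.ofList d) r)
      (key := fun x => x)
    have hne : (PySem.List.sorted (PySem.Set.union (PySem.Set.ofList d) r) (fun x => x) false).Nodup :=
      (PySem.List.sorted_perm _ _ _).symm.nodup (PySem.Set.nodup_union (PySem.Set.ofList d) r (PySem.Set.nodup_ofList d))
    exact (hle.and hne).imp (fun h => lt_of_le_of_ne h.1 h.2)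

-- ===== VERDICT (by name: the statement is the Claim_ definition above) =====
theorem check_orphans_and_missing_spec : Claim_equal_check_orphans_and_missing := by
  intro d r _ hpre
  unfold Spec_check_orphans_and_missing check_orphans_and_missing check_orphans_and_missing_alt
  simp only []
  rw [foldl_classify, foldl_append_map, foldl_append_map,
    sorted_diff_eq_filter_sorted_union d r hpre.1,
    sorted_diff_eq_filter_sorted_union' d r hpre.2]
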